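-- pv_equiv track=rewrite | github.com/MahyarFardin/cs559_code_completion | create_completion_datasets.py | create_token_level_dataset
-- ===== SOURCE A (Python) =====
-- from typing import List, Tuple
--
-- def create_token_level_dataset(sequences: List[List[str]], max_length: int = 256) -> List[Tuple[str, str]]:
--     """
--     Create token-level dataset for next-token prediction.
--     Each example: (context, target_token)
--     """
--     examples = []
--     for tokens in sequences:
--         # Create sliding window examples
--         for i in range(1, len(tokens)):
--             # Context: tokens up to (but not including) target
--             context = tokens[:i]
--             target = tokens[i]
--
--             # Truncate context if too long
--             if len(context) > max_length - 1:
--                 context = context[-(max_length - 1):]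
--
--             context_str = " ".join(context)
--             examples.append((context_str, target))
--
--     return examples
-- ===== SOURCE B (Python) =====
-- from typing import List, Tuple
--
-- def create_token_level_dataset(sequences: List[List[str]], max_length: int = 256) -> List[Tuple[str, str]]:
--     """
--     Create token-level dataset for next-token prediction, scanning each
--     sequence once with a bounded sliding-window buffer (max_length - 1 tokens).
--     Each example: (context, target_token)
--     """
--     examples = []
--     cap = max_length - 1
--     for tokens in sequences:
--         window = []
--         for i, target in enumerate(tokens):
--             if i:
--                 examples.append((" ".join(window), target))
--             window.append(target)
--             if len(window) > cap:
--                 window.pop(0)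
--     return examples
-- ===== Notes on version B (the rewrite author's own statement) =====
-- stated objective: alternative
-- what changed: B scans each sequence once while maintaining a bounded sliding-window buffer (append + pop-front, at most max_length-1 tokens) instead of A's re-slicing tokens[:i] and re-truncating with a negative-index slice at every position.
-- intended difference: For max_length <= 1 with some sequence longer than 2 - max_length, A's negative-index slice stops truncating (max_length = 1 keeps the whole prefix, max_length <= 0 keeps everything past a fixed front offset) so A returns contexts longer than the requested cap, while B returns the empty context, the intended meaning of a context budget of max_length - 1 <= 0 tokens. — e.g. on create_token_level_dataset([["a", "b"]], 1): A returns [("a", "b")], B returns [("", "b")]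
import Mathlib
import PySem

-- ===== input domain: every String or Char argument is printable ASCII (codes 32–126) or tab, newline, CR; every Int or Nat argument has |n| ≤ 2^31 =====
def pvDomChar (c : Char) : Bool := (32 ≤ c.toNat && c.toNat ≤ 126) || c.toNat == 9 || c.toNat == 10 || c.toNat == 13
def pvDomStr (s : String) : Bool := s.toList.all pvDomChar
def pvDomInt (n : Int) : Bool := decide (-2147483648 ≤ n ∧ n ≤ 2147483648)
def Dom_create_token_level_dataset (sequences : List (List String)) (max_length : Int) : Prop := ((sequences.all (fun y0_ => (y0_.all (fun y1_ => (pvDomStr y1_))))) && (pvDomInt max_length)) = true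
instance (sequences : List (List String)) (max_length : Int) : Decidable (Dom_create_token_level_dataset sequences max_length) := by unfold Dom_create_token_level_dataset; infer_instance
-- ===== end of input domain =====

-- B replaces A's re-slicing of tokens[:i] at every position by a single pass per
-- sequence maintaining a bounded sliding-window buffer (at most max_length - 1 tokens).

-- ===== PORT A =====
def create_token_level_dataset (sequences : List (List String)) (max_length : Int) : List (String × String) :=
  sequences.foldl (fun examples tokens =>
    (PySem.List.pyRange 1 (tokens.length : Int) 1).foldl (fun ex i =>
      let context := PySem.List.slice tokens none (some i)        -- tokens[:i]
      let target := PySem.List.pyGetD tokens i ""                 -- tokens[i] (i always in range)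
      let context := if ((context.length : Int) > max_length - 1) then
          PySem.List.slice context (some (-(max_length - 1))) none -- context[-(max_length-1):]
        else context
      ex ++ [(PySem.Str.join " " context, target)]) examples) []

-- ===== PORT B =====
def create_token_level_dataset_alt (sequences : List (List String)) (max_length : Int) : List (String × String) :=
  let cap := max_length - 1
  sequences.foldl (fun examples tokens =>
    ((PySem.List.enumerate tokens 0).foldl
      (fun (st : List (String × String) × List String) it =>
        let ex := if it.1 ≠ 0 then st.1 ++ [(PySem.Str.join " " st.2, it.2)] else st.1
        let w := st.2 ++ [it.2]
        (ex, if (w.length : Int) > cap then w.tail else w))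
      (examples, ([] : List String))).1) []

-- ===== PRECONDITION & SPEC =====
-- For max_length ≤ 1 and a sequence longer than 2 - max_length, A's negative-index slice
-- stops truncating (max_length = 1 keeps the WHOLE prefix, max_length ≤ 0 keeps everything
-- past a fixed front offset), so A returns contexts longer than the requested limit; B keeps
-- the bounded window, returning the empty context, which is what a context cap ≤ 0 means.
def D_create_token_level_dataset (sequences : List (List String)) (max_length : Int) : Prop :=
  max_length ≤ 1 ∧ ∃ s ∈ sequences, (2 - max_length) < (s.length : Int)
instance (sequences : List (List String)) (max_length : Int) : Decidable (D_create_token_level_dataset sequences max_length) := by unfold D_create_token_level_dataset; infer_instance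

def Spec_create_token_level_dataset (sequences : List (List String)) (max_length : Int) (out : List (String × String)) : Prop := ¬ D_create_token_level_dataset sequences max_length → out = create_token_level_dataset_alt sequences max_length
instance (sequences : List (List String)) (max_length : Int) (out : List (String × String)) : Decidable (Spec_create_token_level_dataset sequences max_length out) := by unfold Spec_create_token_level_dataset; infer_instance

def pvDiffWitness_create_token_level_dataset : List (List String) × Int := ([["a", "b"]], 1)
def pvDiffWitnessOut_create_token_level_dataset : (List (String × String)) × (List (String × String)) :=
  ([("a", "b")], [("", "b")])

-- ===== CLAIM (what is proved, stated in full; the proofs are below) =====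
def Claim_unchanged_create_token_level_dataset : Prop := ∀ (sequences : List (List String)) (max_length : Int), Dom_create_token_level_dataset sequences max_length → Spec_create_token_level_dataset sequences max_length (create_token_level_dataset sequences max_length)
def Claim_changed_create_token_level_dataset : Prop := Dom_create_token_level_dataset (pvDiffWitness_create_token_level_dataset.1) (pvDiffWitness_create_token_level_dataset.2) ∧ D_create_token_level_dataset (pvDiffWitness_create_token_level_dataset.1) (pvDiffWitness_create_token_level_dataset.2) ∧ create_token_level_dataset (pvDiffWitness_create_token_level_dataset.1) (pvDiffWitness_create_token_level_dataset.2) = pvDiffWitnessOut_create_token_level_dataset.1 ∧ create_token_level_dataset_alt (pvDiffWitness_create_token_level_dataset.1) (pvDiffWitness_create_token_level_dataset.2) = pvDiffWitnessOut_create_token_level_dataset.2 ∧ pvDiffWitnessOut_create_token_level_dataset.1 ≠ pvDiffWitnessOut_create_token_level_dataset.2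

-- ===== LEMMAS AND PROOFS =====

-- window evolution of B's inner loop
def pvWStep (cap : Int) (w : List String) (t : String) : List String :=
  let w' := w ++ [t]
  if (w'.length : Int) > cap then w'.tail else w'

-- the pairs B's inner loop emits, given the window w entering the step
def pvEmits (cap : Int) (w : List String) : List String → List (String × String)
  | [] => []
  | t :: ts => (PySem.Str.join " " w, t) :: pvEmits cap (pvWStep cap w t) ts

-- the window after processing prefix p, for cap = max_length - 1 ≥ 1
def pvWSpec (capN : Nat) (p : List String) : List String := p.drop (p.length - capN)

lemma pvB_inner (cap : Int) (ts : List String) :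
    ∀ (s : Int), 1 ≤ s → ∀ (acc : List (String × String)) (w : List String),
    (PySem.List.enumerate ts s).foldl
      (fun (st : List (String × String) × List String) it =>
        let ex := if it.1 ≠ 0 then st.1 ++ [(PySem.Str.join " " st.2, it.2)] else st.1
        let w := st.2 ++ [it.2]
        (ex, if (w.length : Int) > cap then w.tail else w))
      (acc, w)
    = (acc ++ pvEmits cap w ts, ts.foldl (pvWStep cap) w) := by
  induction ts with
  | nil => intro s hs acc w; simp [pvEmits, PySem.List.enumerate_nil]
  | cons t ts ih =>
    intro s hs acc w
    rw [PySem.List.enumerate_cons]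
    simp only [List.foldl_cons]
    have hne : s ≠ 0 := by omega
    simp only [hne, if_pos, ne_eq, not_false_eq_true]
    rw [ih (s + 1) (by omega)]
    simp [pvEmits, pvWStep, List.append_assoc]

lemma pvWStep_spec (capN : Nat) (hcap : 1 ≤ capN) (ml : Int) (hml : ml - 1 = (capN : Int))
    (p : List String) (t : String) :
    pvWStep (ml - 1) (pvWSpec capN p) t = pvWSpec capN (p ++ [t]) := by
  unfold pvWStep pvWSpec
  by_cases hlt : p.length < capN
  · have h0 : p.length - capN = 0 := by omega
    have h0' : p.length + 1 - capN = 0 := by omega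
    simp only [h0, h0', List.drop_zero, List.length_append,
      List.length_cons, List.length_nil]
    rw [if_neg (by push_cast; omega)]
  · have hge : capN ≤ p.length := by omega
    have hlen : (p.drop (p.length - capN)).length = capN := by
      rw [List.length_drop]; omega
    have hc : (((p.drop (p.length - capN) ++ [t]).length : Nat) : Int) > ml - 1 := by
      simp only [List.length_append, hlen, List.length_singleton]; push_cast; omega
    rw [if_pos hc]
    have hne : p.drop (p.length - capN) ≠ [] := by
      intro h; rw [h] at hlen; simp at hlen; omega
    rw [List.tail_append_of_ne_nil hne]
    have h1 : (p ++ [t]).length - capN = (p.length - capN) + 1 := by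
      simp [List.length_append]; omega
    rw [h1, List.drop_append_of_le_length (by omega)]
    simp [List.tail_drop]

lemma pvTrunc_eq (ml : Int) (hml : 2 ≤ ml) (p : List String) :
    (if ((p.length : Int) > ml - 1) then PySem.List.slice p (some (-(ml - 1))) none else p)
      = pvWSpec (ml - 1).toNat p := by
  have hcast : ((ml - 1).toNat : Int) = ml - 1 := Int.toNat_of_nonneg (by omega)
  unfold pvWSpec
  by_cases hgt : (p.length : Int) > ml - 1
  · rw [if_pos hgt, ← hcast, PySem.List.slice_from_neg_natCast _ _ (by omega)]
    simp
  · rw [if_neg hgt]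
    have : p.length - (ml - 1).toNat = 0 := by omega
    rw [this, List.drop_zero]

lemma pvEmits_eq (ml : Int) (hml : 2 ≤ ml) (tokens : List String) :
    ∀ (ts p : List String), tokens = p ++ ts →
    pvEmits (ml - 1) (pvWSpec (ml - 1).toNat p) ts =
      (PySem.List.pyRange (p.length : Int) (tokens.length : Int) 1).map (fun i =>
        (PySem.Str.join " "
          (if (((PySem.List.slice tokens none (some i)).length : Int) > ml - 1) then
            PySem.List.slice (PySem.List.slice tokens none (some i)) (some (-(ml - 1))) none
          else PySem.List.slice tokens none (some i)),
         PySem.List.pyGetD tokens i "")) := by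
  intro ts
  induction ts with
  | nil =>
    intro p h
    rw [h]
    simp [pvEmits, PySem.List.pyRange_one_eq_nil]
  | cons t ts ih =>
    intro p h
    have hlen : tokens.length = p.length + (ts.length + 1) := by rw [h]; simp
    have hlt : (p.length : Int) < (tokens.length : Int) := by push_cast [hlen]; omega
    rw [PySem.List.pyRange_one_cons hlt, List.map_cons]
    show (PySem.Str.join " " (pvWSpec (ml - 1).toNat p), t) :: _ = _
    congr 1
    · -- head
      have hslice : PySem.List.slice tokens none (some (p.length : Int)) = p := by
        rw [PySem.List.slice_to_natCast, h, List.take_left]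
      have hget : PySem.List.pyGetD tokens (p.length : Int) "" = t := by
        rw [PySem.List.pyGetD_natCast, h]
        simp [List.getD]
      rw [hslice, hget, pvTrunc_eq ml hml p]
    · -- tail
      have hcast : ((ml - 1).toNat : Int) = ml - 1 := Int.toNat_of_nonneg (by omega)
      rw [pvWStep_spec (ml - 1).toNat (by omega) ml hcast.symm p t]
      rw [ih (p ++ [t]) (by rw [h, List.append_assoc]; rfl)]
      congr 2
      simp

lemma pvEmits_nil (cap : Int) (hcap : cap ≤ 0) :
    ∀ ts : List String, pvEmits cap [] ts = ts.map (fun t => ("", t)) := by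
  intro ts
  induction ts with
  | nil => rfl
  | cons t ts ih =>
    show (PySem.Str.join " " [], t) :: pvEmits cap (pvWStep cap [] t) ts = _
    have hw : pvWStep cap [] t = [] := by
      unfold pvWStep
      rw [if_pos (by simp; omega)]
      rfl
    rw [hw, ih]
    rfl

-- per-sequence equality of the two inner loops
lemma pvSeq_eq (ml : Int) (tokens : List String) (acc : List (String × String))
    (h : 2 ≤ ml ∨ (tokens.length : Int) ≤ 2 - ml) :
    (PySem.List.pyRange 1 (tokens.length : Int) 1).foldl (fun ex i =>
      let context := PySem.List.slice tokens none (some i)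
      let target := PySem.List.pyGetD tokens i ""
      let context := if ((context.length : Int) > ml - 1) then
          PySem.List.slice context (some (-(ml - 1))) none
        else context
      ex ++ [(PySem.Str.join " " context, target)]) acc
    = ((PySem.List.enumerate tokens 0).foldl
      (fun (st : List (String × String) × List String) it =>
        let ex := if it.1 ≠ 0 then st.1 ++ [(PySem.Str.join " " st.2, it.2)] else st.1
        let w := st.2 ++ [it.2]
        (ex, if (w.length : Int) > ml - 1 then w.tail else w))
      (acc, ([] : List String))).1 := by
  rw [PySem.List.foldl_append_singleton_eq_map]
  cases tokens with
  | nil =>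
    simp [PySem.List.enumerate_nil, PySem.List.pyRange_one_eq_nil]
  | cons t ts =>
    rw [PySem.List.enumerate_cons, List.foldl_cons]
    have hfix : (let ex := if (((0 : Int), t)).1 ≠ 0 then ((acc, ([] : List String))).1 ++ [(PySem.Str.join " " ((acc, ([] : List String))).2, (((0 : Int), t)).2)] else ((acc, ([] : List String))).1
          let w := ((acc, ([] : List String))).2 ++ [(((0 : Int), t)).2]
          (ex, if (w.length : Int) > ml - 1 then w.tail else w))
        = (acc, if (([t].length : Int) > ml - 1) then ([t] : List String).tail else [t]) := by
      simp
    rw [hfix, show (0 : Int) + 1 = 1 from by norm_num]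
    rw [pvB_inner (ml - 1) ts 1 (by omega) acc _]
    by_cases hml : 2 ≤ ml
    · -- real truncation: window is the pvWSpec suffix
      have hw1 : (if (([t].length : Int) > ml - 1) then ([t] : List String).tail else [t]) = pvWSpec (ml - 1).toNat [t] := by
        rw [if_neg (by simp; omega)]
        unfold pvWSpec
        have : ([t] : List String).length - (ml - 1).toNat = 0 := by
          simp; omega
        rw [this, List.drop_zero]
      rw [hw1, pvEmits_eq ml hml (t :: ts) ts [t] rfl]
      simp
    · -- degenerate cap: window is always empty, every A-context slices to []
      have hml1 : ml ≤ 1 := by omega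
      have hlen2 : ((t :: ts).length : Int) ≤ 2 - ml := by
        rcases h with h | h
        · omega
        · exact h
      have hw1 : (if (([t].length : Int) > ml - 1) then ([t] : List String).tail else [t]) = [] := by
        rw [if_pos (by simp; omega)]
        rfl
      rw [hw1, pvEmits_nil (ml - 1) (by omega) ts]
      congr 1
      have hmap : ∀ i ∈ PySem.List.pyRange 1 ((t :: ts).length : Int) 1,
          ((PySem.Str.join " "
            (if (((PySem.List.slice (t :: ts) none (some i)).length : Int) > ml - 1) then
              PySem.List.slice (PySem.List.slice (t :: ts) none (some i)) (some (-(ml - 1))) none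
            else PySem.List.slice (t :: ts) none (some i)),
           PySem.List.pyGetD (t :: ts) i "") : String × String)
          = ("", PySem.List.pyGetD (t :: ts) i "") := by
        intro i hi
        rw [PySem.List.mem_pyRange_one] at hi
        have hctx : PySem.List.slice (t :: ts) none (some i) = (t :: ts).take i.toNat :=
          PySem.List.slice_to _ (by omega)
        have hctxlen : ((t :: ts).take i.toNat).length = i.toNat := by
          rw [List.length_take]
          omega
        have hc : (((PySem.List.slice (t :: ts) none (some i)).length : Int) > ml - 1) := by
          rw [hctx, hctxlen]; omega
        rw [if_pos hc, hctx]
        have hfrom : PySem.List.slice ((t :: ts).take i.toNat) (some (-(ml - 1))) none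
            = ((t :: ts).take i.toNat).drop (1 - ml).toNat := by
          have : -(ml - 1) = 1 - ml := by ring
          rw [this, PySem.List.slice_from _ (by omega)]
        rw [hfrom, List.drop_eq_nil_of_le (by rw [hctxlen]; omega)]
        rfl
      rw [List.map_congr_left hmap]
      have : (fun i => (("" : String), PySem.List.pyGetD (t :: ts) i ""))
          = (fun x => (("" : String), x)) ∘ (fun i => PySem.List.pyGetD (t :: ts) i "") := rfl
      rw [this, ← List.map_map, PySem.List.map_pyGetD_pyRange' (t :: ts) "" (by omega)]
      simp

-- ===== VERDICT (by name: the statement is the Claim_ definition above) =====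
theorem create_token_level_dataset_spec : Claim_unchanged_create_token_level_dataset := by
  intro seqs ml _ hnd
  have hper : ∀ s ∈ seqs, 2 ≤ ml ∨ (s.length : Int) ≤ 2 - ml := by
    intro s hs
    by_cases h1 : ml ≤ 1
    · right
      by_contra hc
      exact hnd ⟨h1, s, hs, by omega⟩
    · left; omega
  show create_token_level_dataset seqs ml = create_token_level_dataset_alt seqs ml
  unfold create_token_level_dataset create_token_level_dataset_alt
  exact PySem.List.foldl_congr_mem seqs _ _ []
    (fun acc x hx => pvSeq_eq ml x acc (hper x hx))

theorem create_token_level_dataset_changed : Claim_changed_create_token_level_dataset := by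
  unfold Claim_changed_create_token_level_dataset; decide
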